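-- pv_equiv track=rewrite | github.com/Harshul-18/CodeSignal-My-Solutions | Arcade/Intro/matrixElementsSum.py | solution
-- ===== SOURCE A (Python) =====
-- def solution(matrix):
--     result = 0
--     below0 = []
--     for i in range(len(matrix)):
--         for j in range(len(matrix[i])):
--             current = matrix[i][j]
--             if current == 0:
--                 below0.append(j)
--             if j in below0:
--                 continue
--             else:
--                 result += current
--     return result
-- ===== SOURCE B (Python) =====
-- def solution(matrix):
--     result = 0
--     ncols = 0
--     for row in matrix:
--         if len(row) > ncols:
--             ncols = len(row)
--     for j in range(ncols):
--         for row in matrix: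
--             if j < len(row):
--                 v = row[j]
--                 if v == 0:
--                     break
--                 result += v
--     return result
-- ===== Notes on version B (the rewrite author's own statement) =====
-- stated objective: simpler
-- what changed: B traverses the matrix column-major and breaks each column at its first zero, eliminating A's growing below0 list and its per-element membership scan.
import Mathlib
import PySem

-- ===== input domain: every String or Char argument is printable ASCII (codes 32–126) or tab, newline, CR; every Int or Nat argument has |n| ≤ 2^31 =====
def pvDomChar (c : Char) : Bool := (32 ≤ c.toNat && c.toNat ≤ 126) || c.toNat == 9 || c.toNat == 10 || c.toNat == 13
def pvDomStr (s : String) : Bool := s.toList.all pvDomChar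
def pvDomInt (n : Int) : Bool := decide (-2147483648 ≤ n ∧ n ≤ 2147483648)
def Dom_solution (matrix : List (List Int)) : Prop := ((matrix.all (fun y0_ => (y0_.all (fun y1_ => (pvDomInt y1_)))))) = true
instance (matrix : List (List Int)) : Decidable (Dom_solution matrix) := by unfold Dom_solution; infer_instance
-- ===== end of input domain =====

-- B iterates column-major with an early break at the first zero of each column,
-- replacing A's growing `below0` membership list; same return value, simpler.

-- ===== PORT A =====
-- row-major loop; `for j in range(len(matrix[i])): current = matrix[i][j]` ported as a
-- fold over row.zipIdx (indices are exactly 0..len-1, accesses in range, so exact).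
def solution (matrix : List (List Int)) : Int :=
  (matrix.foldl (fun (st : Int × List Nat) row =>
      row.zipIdx.foldl (fun (st : Int × List Nat) cj =>
        let current := cj.1
        let below0 := if current = 0 then st.2 ++ [cj.2] else st.2
        if cj.2 ∈ below0 then (st.1, below0) else (st.1 + current, below0)) st)
    (0, [])).1

-- ===== PORT B =====
-- inner `for row in matrix: ... break` ported as structural recursion with early exit;
-- row[j] with j < len(row) is exact as row.getD j 0.
def colSumB (rows : List (List Int)) (j : Nat) (acc : Int) : Int :=
  match rows with
  | [] => acc
  | row :: rest =>
    if j < row.length then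
      let v := row.getD j 0
      if v = 0 then acc else colSumB rest j (acc + v)
    else colSumB rest j acc

def solution_alt (matrix : List (List Int)) : Int :=
  let ncols := matrix.foldl (fun m row => if row.length > m then row.length else m) 0
  (List.range ncols).foldl (fun result j => colSumB matrix j result) 0

-- ===== PRECONDITION & SPEC =====
def Spec_solution (matrix : List (List Int)) (out : Int) : Prop := out = solution_alt matrix
instance (matrix : List (List Int)) (out : Int) : Decidable (Spec_solution matrix out) := by unfold Spec_solution; infer_instance

-- ===== CLAIM (what is proved, stated in full; the proofs are below) =====
def Claim_equal_solution : Prop := ∀ (matrix : List (List Int)), Dom_solution matrix → Spec_solution matrix (solution matrix)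

-- ===== LEMMAS AND PROOFS =====

-- maximal row length (same fold as in solution_alt)
def widthM (rows : List (List Int)) : Nat :=
  rows.foldl (fun m row => if row.length > m then row.length else m) 0

-- value contributed by one row of A's loop, starting at column index k with poisoned set b
def rowSum : List Int → Nat → List Nat → Int
  | [], _, _ => 0
  | c :: cs, k, b =>
    if c = 0 then rowSum cs (k + 1) (b ++ [k])
    else (if k ∈ b then 0 else c) + rowSum cs (k + 1) b

-- indices (from offset k) of the zeros of a row, in order
def zerosIdx : List Int → Nat → List Nat
  | [], _ => []
  | c :: cs, k => (if c = 0 then [k] else []) ++ zerosIdx cs (k + 1)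

theorem innerFold_eq (row : List Int) (k : Nat) (r : Int) (b : List Nat) :
    (List.zipIdx row k).foldl (fun (st : Int × List Nat) cj =>
        let current := cj.1
        let below0 := if current = 0 then st.2 ++ [cj.2] else st.2
        if cj.2 ∈ below0 then (st.1, below0) else (st.1 + current, below0)) (r, b)
      = (r + rowSum row k b, b ++ zerosIdx row k) := by
  induction row generalizing k r b with
  | nil => simp [rowSum, zerosIdx]
  | cons c cs ih =>
    by_cases hc : c = 0
    · simp [List.zipIdx_cons, hc, rowSum, zerosIdx, ih, List.append_assoc]
    · by_cases hk : k ∈ b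
      · simp [List.zipIdx_cons, hc, hk, rowSum, zerosIdx, ih]
      · simp [List.zipIdx_cons, hc, hk, rowSum, zerosIdx, ih, add_assoc]

theorem rowSum_congr (row : List Int) (k : Nat) (b b' : List Nat)
    (h : ∀ j, k ≤ j → (j ∈ b ↔ j ∈ b')) : rowSum row k b = rowSum row k b' := by
  induction row generalizing k b b' with
  | nil => rfl
  | cons c cs ih =>
    simp only [rowSum]
    by_cases hc : c = 0
    · simp only [hc, if_true]
      exact ih (k + 1) _ _ (fun j hj => by
        simp only [List.mem_append, List.mem_singleton]
        constructor
        · rintro (h1 | h1)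
          · exact Or.inl ((h j (by omega)).1 h1)
          · exact Or.inr h1
        · rintro (h1 | h1)
          · exact Or.inl ((h j (by omega)).2 h1)
          · exact Or.inr h1)
    · have hm : (k ∈ b) = (k ∈ b') := propext (h k le_rfl)
      simp [hc, hm, ih (k + 1) b b' (fun j hj => h j (by omega))]

theorem rowSum_eq (row : List Int) (k : Nat) (b : List Nat) :
    rowSum row k b
      = ∑ i ∈ Finset.range row.length,
          (if row.getD i 0 = 0 ∨ (k + i) ∈ b then 0 else row.getD i 0) := by
  induction row generalizing k b with
  | nil => simp [rowSum]
  | cons c cs ih =>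
    rw [List.length_cons, Finset.sum_range_succ']
    simp only [List.getD_cons_succ, List.getD_cons_zero]
    by_cases hc : c = 0
    · rw [rowSum, if_pos hc,
        rowSum_congr cs (k + 1) (b ++ [k]) b (fun j hj => by
          simp only [List.mem_append, List.mem_singleton]
          constructor
          · rintro (h1 | h1)
            · exact h1
            · omega
          · exact Or.inl),
        ih]
      simp only [hc, true_or, if_true, add_zero]
      exact Finset.sum_congr rfl (fun i _ => by
        have : k + 1 + i = k + (i + 1) := by omega
        rw [this])
    · rw [rowSum, if_neg hc, ih]
      have h0 : (if c = 0 ∨ (k + 0) ∈ b then (0:Int) else c) = (if k ∈ b then 0 else c) := by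
        simp [hc]
      rw [h0, add_comm]
      congr 1
      exact Finset.sum_congr rfl (fun i _ => by
        have : k + 1 + i = k + (i + 1) := by omega
        rw [this])

theorem mem_zerosIdx (row : List Int) (k j : Nat) :
    j ∈ zerosIdx row k ↔ ∃ i, i < row.length ∧ j = k + i ∧ row.getD i 0 = 0 := by
  induction row generalizing k with
  | nil => simp [zerosIdx]
  | cons c cs ih =>
    simp only [zerosIdx, List.mem_append, ih, List.length_cons]
    constructor
    · rintro (h1 | ⟨i, hi, hj, hz⟩)
      · by_cases hc : c = 0
        · simp [hc] at h1
          exact ⟨0, by omega, by omega, by simpa using hc⟩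
        · simp [hc] at h1
      · exact ⟨i + 1, by omega, by omega, by simpa using hz⟩
    · rintro ⟨i, hi, hj, hz⟩
      cases i with
      | zero =>
        left
        simp only [List.getD_cons_zero] at hz
        subst hj
        simp [hz]
      | succ n =>
        right
        exact ⟨n, by omega, by omega, by simpa using hz⟩

theorem foldl_max_aux (rows : List (List Int)) (init : Nat) :
    rows.foldl (fun m row => if row.length > m then row.length else m) init
      = max init (rows.foldl (fun m row => if row.length > m then row.length else m) 0) := by
  induction rows generalizing init with
  | nil => simp
  | cons row rest ih =>
    simp only [List.foldl_cons]
    rw [ih, ih (if row.length > 0 then row.length else 0)]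
    split <;> split <;> omega

theorem widthM_cons (row : List Int) (rest : List (List Int)) :
    widthM (row :: rest) = max row.length (widthM rest) := by
  simp only [widthM, List.foldl_cons]
  rw [foldl_max_aux]
  split <;> omega

theorem colSumB_cons (row : List Int) (rest : List (List Int)) (j : Nat) (acc : Int) :
    colSumB (row :: rest) j acc
      = if j < row.length then
          (if row.getD j 0 = 0 then acc else colSumB rest j (acc + row.getD j 0))
        else colSumB rest j acc := rfl

theorem colSumB_acc (rows : List (List Int)) (j : Nat) (acc : Int) :
    colSumB rows j acc = acc + colSumB rows j 0 := by
  induction rows generalizing acc with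
  | nil => simp [colSumB]
  | cons row rest ih =>
    simp only [colSumB]
    split
    · split
      · simp
      · rw [ih, ih (0 + _)]; try ring
    · rw [ih, ih 0]; try ring

theorem colSumB_zero_of_ge (rows : List (List Int)) (j : Nat) (h : widthM rows ≤ j) :
    colSumB rows j 0 = 0 := by
  induction rows with
  | nil => rfl
  | cons row rest ih =>
    rw [widthM_cons] at h
    simp only [colSumB]
    rw [if_neg (by omega)]
    exact ih (by omega)

theorem outerFold_eq (rows : List (List Int)) (r : Int) (b : List Nat) :
    (rows.foldl (fun (st : Int × List Nat) row =>
        row.zipIdx.foldl (fun (st : Int × List Nat) cj =>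
          let current := cj.1
          let below0 := if current = 0 then st.2 ++ [cj.2] else st.2
          if cj.2 ∈ below0 then (st.1, below0) else (st.1 + current, below0)) st) (r, b)).1
      = r + ∑ j ∈ Finset.range (widthM rows), (if j ∈ b then 0 else colSumB rows j 0) := by
  induction rows generalizing r b with
  | nil => simp [widthM]
  | cons row rest ih =>
    rw [List.foldl_cons, innerFold_eq, ih, widthM_cons]
    have hg : rowSum row 0 b
        = ∑ i ∈ Finset.range (max row.length (widthM rest)), (if row.getD i 0 = 0 ∨ i ∈ b then 0 else row.getD i 0) := by
      rw [rowSum_eq]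
      simp only [Nat.zero_add]
      refine Finset.sum_subset (by intro x hx; rw [Finset.mem_range] at hx ⊢; omega)
        (fun i _ hi => ?_)
      rw [Finset.mem_range, not_lt] at hi
      rw [List.getD_eq_default _ _ hi]
      simp
    have hh : (∑ j ∈ Finset.range (widthM rest),
          (if j ∈ b ++ zerosIdx row 0 then 0 else colSumB rest j 0))
        = ∑ j ∈ Finset.range (max row.length (widthM rest)), (if j ∈ b ++ zerosIdx row 0 then 0 else colSumB rest j 0) := by
      refine Finset.sum_subset (by intro x hx; rw [Finset.mem_range] at hx ⊢; omega)
        (fun j _ hj => ?_)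
      rw [Finset.mem_range, not_lt] at hj
      rw [colSumB_zero_of_ge rest j hj]
      simp
    rw [hg, hh, add_assoc, ← Finset.sum_add_distrib]
    congr 1
    refine Finset.sum_congr rfl (fun j _ => ?_)
    have hbz : j ∈ b ++ zerosIdx row 0 ↔ j ∈ b ∨ (j < row.length ∧ row.getD j 0 = 0) := by
      rw [List.mem_append, mem_zerosIdx]
      constructor
      · rintro (h1 | ⟨i, hi, hj, hz⟩)
        · exact Or.inl h1
        · exact Or.inr ⟨by omega, by rwa [show j = i by omega]⟩
      · rintro (h1 | ⟨h1, h2⟩)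
        · exact Or.inl h1
        · exact Or.inr ⟨j, h1, by omega, h2⟩
    by_cases hb : j ∈ b
    · rw [if_pos (Or.inr hb : row.getD j 0 = 0 ∨ j ∈ b),
        if_pos (List.mem_append.2 (Or.inl hb)), if_pos hb]
      simp
    · by_cases hlt : j < row.length
      · by_cases hz : row.getD j 0 = 0
        · rw [if_pos (Or.inl hz : row.getD j 0 = 0 ∨ j ∈ b), if_pos (hbz.2 (Or.inr ⟨hlt, hz⟩)),
            if_neg hb, colSumB_cons, if_pos hlt, if_pos hz]
          simp
        · have hbz' : j ∉ b ++ zerosIdx row 0 := fun h => by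
            rcases hbz.1 h with h1 | ⟨_, h2⟩
            · exact hb h1
            · exact hz h2
          rw [if_neg (by tauto : ¬(row.getD j 0 = 0 ∨ j ∈ b)), if_neg hbz', if_neg hb,
            colSumB_cons, if_pos hlt, if_neg hz, colSumB_acc rest j (0 + row.getD j 0)]
          omega
      · have hz : row.getD j 0 = 0 := List.getD_eq_default _ _ (by omega)
        have hbz' : j ∉ b ++ zerosIdx row 0 := fun h => by
          rcases hbz.1 h with h1 | ⟨h1, _⟩
          · exact hb h1
          · omega
        rw [if_pos (Or.inl hz : row.getD j 0 = 0 ∨ j ∈ b), if_neg hbz', if_neg hb,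
          colSumB_cons, if_neg hlt]
        simp

theorem rangeFold_eq (m : List (List Int)) (n : Nat) (a : Int) :
    (List.range n).foldl (fun result j => colSumB m j result) a
      = a + ∑ j ∈ Finset.range n, colSumB m j 0 := by
  induction n generalizing a with
  | zero => simp
  | succ n ih =>
    rw [List.range_succ, List.foldl_append, ih, Finset.sum_range_succ, List.foldl_cons,
      List.foldl_nil, colSumB_acc]
    ring

-- ===== VERDICT (by name: the statement is the Claim_ definition above) =====
theorem solution_spec : Claim_equal_solution := by
  intro matrix _
  show solution matrix = solution_alt matrix
  rw [solution, solution_alt]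
  rw [outerFold_eq]
  rw [show (matrix.foldl (fun m row => if row.length > m then row.length else m) 0) = widthM matrix from rfl]
  rw [rangeFold_eq]
  simp
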